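-- pv_equiv track=rewrite | github.com/ArchipelagoMW/Archipelago | worlds/tunic/combat_logic.py | calc_hp_potion_cost
-- ===== SOURCE A (Python) =====
-- def calc_hp_potion_cost(hp_upgrades: int, potion_upgrades: int) -> int:
--     money = 0
--
--     # hp costs 200 for the first, +50 for each additional
--     money_per_hp = 200
--     for _ in range(hp_upgrades):
--         money += money_per_hp
--         money_per_hp += 50
--
--     # potion costs 100 for the first, 300 for the second, 1,000 for the third, and +200 for each additional
--     # currently we assume you will not buy past the second potion upgrade, but we might change our minds later
--     money_per_potion = 100
--     for _ in range(potion_upgrades):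
--         money += money_per_potion
--         if money_per_potion == 100:
--             money_per_potion = 300
--         elif money_per_potion == 300:
--             money_per_potion = 1000
--         else:
--             money_per_potion += 200
--
--     return money
-- ===== SOURCE B (Python) =====
-- def calc_hp_potion_cost(hp_upgrades: int, potion_upgrades: int) -> int:
--     # closed-form arithmetic series instead of loops
--     h = max(hp_upgrades, 0)
--     p = max(potion_upgrades, 0)
--     hp_cost = 25 * h * h + 175 * h          # sum of 200, 250, 300, ...
--     if p == 0:
--         potion_cost = 0
--     elif p == 1:
--         potion_cost = 100
--     elif p == 2:
--         potion_cost = 400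
--     else:                                   # 100 + 300 + 1000 + 1200 + 1400 + ...
--         potion_cost = 100 * p * p + 500 * p - 1000
--     return hp_cost + potion_cost
-- ===== Notes on version B (the rewrite author's own statement) =====
-- stated objective: faster
-- what changed: Replaced the two accumulation loops by closed-form arithmetic-series formulas (quadratic polynomial for HP cost, case split plus polynomial for potion cost).
import Mathlib
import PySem

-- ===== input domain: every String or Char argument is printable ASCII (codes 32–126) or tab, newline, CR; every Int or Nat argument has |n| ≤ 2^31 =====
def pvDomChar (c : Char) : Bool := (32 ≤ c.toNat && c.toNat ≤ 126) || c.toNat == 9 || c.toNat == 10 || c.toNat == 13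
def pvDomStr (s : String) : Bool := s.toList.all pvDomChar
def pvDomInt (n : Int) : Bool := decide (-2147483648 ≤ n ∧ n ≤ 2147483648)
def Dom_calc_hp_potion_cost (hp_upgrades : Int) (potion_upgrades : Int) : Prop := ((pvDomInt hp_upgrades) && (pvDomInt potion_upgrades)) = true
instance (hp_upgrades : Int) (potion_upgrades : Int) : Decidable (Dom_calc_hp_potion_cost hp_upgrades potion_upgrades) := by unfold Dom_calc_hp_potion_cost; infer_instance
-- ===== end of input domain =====

-- B replaces A's two accumulation loops by closed-form arithmetic-series formulas (objective: faster, O(1) vs O(hp+potion)).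


-- ===== PORT A =====
-- A's first loop: money += money_per_hp; money_per_hp += 50, once per range(hp_upgrades) step
def aHpLoop : Nat → Int → Int → Int
  | 0, money, _ => money
  | n + 1, money, mph => aHpLoop n (money + mph) (mph + 50)

-- A's second loop: money += money_per_potion, then the three-way branch updating money_per_potion
def aPotLoop : Nat → Int → Int → Int
  | 0, money, _ => money
  | n + 1, money, mpp =>
      aPotLoop n (money + mpp)
        (if mpp = 100 then 300 else if mpp = 300 then 1000 else mpp + 200)

def calc_hp_potion_cost (hp_upgrades : Int) (potion_upgrades : Int) : Int :=
  aPotLoop potion_upgrades.toNat (aHpLoop hp_upgrades.toNat 0 200) 100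

-- ===== PORT B =====
def calc_hp_potion_cost_alt (hp_upgrades : Int) (potion_upgrades : Int) : Int :=
  let h := max hp_upgrades 0
  let p := max potion_upgrades 0
  let hpCost := 25 * h * h + 175 * h
  let potionCost :=
    if p = 0 then 0
    else if p = 1 then 100
    else if p = 2 then 400
    else 100 * p * p + 500 * p - 1000
  hpCost + potionCost

-- ===== PRECONDITION & SPEC =====
def Spec_calc_hp_potion_cost (hp_upgrades : Int) (potion_upgrades : Int) (out : Int) : Prop := out = calc_hp_potion_cost_alt hp_upgrades potion_upgrades
instance (hp_upgrades : Int) (potion_upgrades : Int) (out : Int) : Decidable (Spec_calc_hp_potion_cost hp_upgrades potion_upgrades out) := by unfold Spec_calc_hp_potion_cost; infer_instance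

-- ===== CLAIM (what is proved, stated in full; the proofs are below) =====
def Claim_equal_calc_hp_potion_cost : Prop := ∀ (hp_upgrades : Int) (potion_upgrades : Int), Dom_calc_hp_potion_cost hp_upgrades potion_upgrades → Spec_calc_hp_potion_cost hp_upgrades potion_upgrades (calc_hp_potion_cost hp_upgrades potion_upgrades)

-- ===== LEMMAS AND PROOFS =====
lemma aHpLoop_closed (n : Nat) : ∀ m c : Int, aHpLoop n m c = m + n * c + 25 * n * (n - 1) := by
  induction n with
  | zero => intro m c; simp [aHpLoop]
  | succ k ih => intro m c; simp only [aHpLoop, ih]; push_cast; ring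

lemma aPotLoop_steady (n : Nat) : ∀ m c : Int, 400 ≤ c →
    aPotLoop n m c = m + n * c + 100 * n * (n - 1) := by
  induction n with
  | zero => intro m c _; simp [aPotLoop]
  | succ k ih =>
    intro m c hc
    simp only [aPotLoop]
    rw [if_neg (by omega), if_neg (by omega), ih _ _ (by omega)]
    push_cast; ring

-- ===== VERDICT (by name: the statement is the Claim_ definition above) =====
theorem calc_hp_potion_cost_spec : Claim_equal_calc_hp_potion_cost := by
  intro h p _
  unfold Spec_calc_hp_potion_cost calc_hp_potion_cost calc_hp_potion_cost_alt
  have hh : ((h.toNat : Int)) = max h 0 := by omega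
  have hp : ((p.toNat : Int)) = max p 0 := by omega
  rw [aHpLoop_closed]
  match hn : p.toNat with
  | 0 =>
    have : max p 0 = 0 := by omega
    simp [aPotLoop, this, hh]; ring
  | 1 =>
    have : max p 0 = 1 := by omega
    simp [aPotLoop, this, hh]; ring
  | 2 =>
    have : max p 0 = 2 := by omega
    norm_num [aPotLoop, this, hh]; ring
  | (k + 3) =>
    have hm : max p 0 = (k : Int) + 3 := by omega
    show aPotLoop (k + 3) _ 100 = _
    simp only [aPotLoop]
    norm_num
    rw [aPotLoop_steady _ _ _ (by norm_num)]
    rw [if_neg (show ¬ p ≤ 0 by omega), if_neg (show ¬ max p 0 = 1 by omega),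
        if_neg (show ¬ max p 0 = 2 by omega)]
    simp only [hm]
    ring
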